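-- pv_equiv track=rewrite | github.com/coado/advent_of_code | 2023/day7/script.py | two_pair
-- ===== SOURCE A (Python) =====
-- def two_pair(hand):
--     cache = {}
--     for i in hand:
--         if i in cache:
--             cache[i] += 1
--         else:
--             cache[i] = 1
--
--     counter = 0
--     for i in cache:
--         if cache[i] == 2:
--             counter += 1
--     return counter == 2
-- ===== SOURCE B (Python) =====
-- def two_pair(hand):
--     s = sorted(hand)
--     pairs = 0
--     while s:
--         c = s[0]
--         j = 1
--         while j < len(s) and s[j] == c:
--             j += 1
--         if j == 2:
--             pairs += 1
--         s = s[j:]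
--     return pairs == 2
-- ===== Notes on version B (the rewrite author's own statement) =====
-- stated objective: alternative
-- what changed: B sorts the hand and counts runs of length exactly 2 in a single scan over the sorted characters, instead of A's frequency dictionary followed by a pass over its keys.
import Mathlib
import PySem

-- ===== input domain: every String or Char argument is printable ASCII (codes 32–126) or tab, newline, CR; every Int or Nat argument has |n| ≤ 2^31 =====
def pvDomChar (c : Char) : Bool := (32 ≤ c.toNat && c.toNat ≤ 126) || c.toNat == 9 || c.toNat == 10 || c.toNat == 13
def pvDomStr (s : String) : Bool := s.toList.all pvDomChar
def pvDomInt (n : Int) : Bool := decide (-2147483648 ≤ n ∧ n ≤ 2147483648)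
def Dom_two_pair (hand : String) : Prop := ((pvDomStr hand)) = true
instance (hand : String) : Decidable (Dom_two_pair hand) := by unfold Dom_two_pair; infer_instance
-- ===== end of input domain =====

-- B sorts the hand and counts runs of length exactly 2 in one scan, replacing A's dict tally (objective: alternative decomposition, similar cost).

-- ===== PORT A =====
-- A: build a frequency dict over the hand, then count keys with count 2; return counter == 2.
def two_pair (hand : String) : Bool :=
  let cache := hand.toList.foldl
    (fun d i => if d.contains i then d.modify i 0 (· + 1) else d.insert i 1)
    (PySem.Dict.empty : PySem.Dict Char Int)
  let counter := cache.keys.foldl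
    (fun n i => if cache.getD i 0 == 2 then n + 1 else n) (0 : Int)
  counter == 2

-- ===== PORT B =====
-- inner while loop of Source B: j counts the leading run of c in the tail, returns (j-1, s[j:]-tail)
def pvSplitRun (c : Char) : List Char → Int × List Char
  | [] => (0, [])
  | x :: xs => if x == c then let p := pvSplitRun c xs; (p.1 + 1, p.2) else (0, x :: xs)

theorem pvSplitRun_len_le (c : Char) (l : List Char) : (pvSplitRun c l).2.length ≤ l.length := by
  induction l with
  | nil => simp [pvSplitRun]
  | cons x xs ih =>
    simp only [pvSplitRun]
    split
    · exact Nat.le_succ_of_le ih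
    · simp

-- outer while loop of Source B over the sorted list, carrying the pair counter
def pvRunLoop : List Char → Int → Int
  | [], pairs => pairs
  | c :: rest, pairs =>
    let p := pvSplitRun c rest
    pvRunLoop p.2 (if p.1 + 1 == 2 then pairs + 1 else pairs)
  termination_by l _ => l.length
  decreasing_by
    exact Nat.lt_succ_of_le (pvSplitRun_len_le c rest)

def two_pair_alt (hand : String) : Bool :=
  pvRunLoop (PySem.List.sorted hand.toList (fun x => x) false) 0 == 2

-- ===== PRECONDITION & SPEC =====
def Spec_two_pair (hand : String) (out : Bool) : Prop := out = two_pair_alt hand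
instance (hand : String) (out : Bool) : Decidable (Spec_two_pair hand out) := by unfold Spec_two_pair; infer_instance

-- ===== CLAIM (what is proved, stated in full; the proofs are below) =====
def Claim_equal_two_pair : Prop := ∀ (hand : String), Dom_two_pair hand → Spec_two_pair hand (two_pair hand)

-- ===== LEMMAS AND PROOFS =====

-- number of distinct chars of l occurring exactly twice, as an Int
def pvTally (l : List Char) : Int :=
  ((PySem.Set.ofList l).countP (fun c => l.count c == 2) : Int)

theorem pvSplitRun_eq (c : Char) (l : List Char) :
    pvSplitRun c l = (((l.takeWhile (fun x => x == c)).length : Int), l.dropWhile (fun x => x == c)) := by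
  induction l with
  | nil => simp [pvSplitRun]
  | cons x xs ih =>
    simp only [pvSplitRun, List.takeWhile, List.dropWhile]
    by_cases h : (x == c) = true
    · simp [h, ih]
    · simp [h]

theorem pvStep_eq (d : PySem.Dict Char Int) (i : Char) :
    (if d.contains i then d.modify i 0 (· + 1) else d.insert i 1) = d.modify i 0 (· + 1) := by
  by_cases h : d.contains i = true
  · simp [h]
  · have hg : d.getD i 0 = 0 := by
      simp [PySem.Dict.getD,
        (PySem.Dict.get?_eq_none_iff_contains d i).mpr (by simpa using h)]
    simp [h, PySem.Dict.modify, hg]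

theorem two_pair_tally (hand : String) :
    two_pair hand = (pvTally hand.toList == 2) := by
  have hcache : hand.toList.foldl
      (fun d i => if d.contains i then d.modify i 0 (· + 1) else d.insert i 1)
      (PySem.Dict.empty : PySem.Dict Char Int) = PySem.Dict.counter hand.toList := by
    rw [PySem.Dict.counter_eq_foldl,
      show (fun (d : PySem.Dict Char Int) i =>
          if d.contains i then d.modify i 0 (· + 1) else d.insert i 1)
        = (fun (d : PySem.Dict Char Int) i => d.modify i 0 (· + 1)) from funext₂ pvStep_eq]
  have hmain : two_pair hand = ((PySem.Dict.counter hand.toList).keys.foldl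
      (fun n i => if (PySem.Dict.counter hand.toList).getD i 0 == 2 then n + 1 else n)
      (0 : Int) == 2) := by
    unfold two_pair
    rw [hcache]
  rw [hmain,
    PySem.List.foldl_if_add_one (fun i => (PySem.Dict.counter hand.toList).getD i 0 == 2) _ 0,
    PySem.Dict.keys_counter]
  unfold pvTally
  have hc : (PySem.Set.ofList hand.toList).countP
      (fun i => (PySem.Dict.counter hand.toList).getD i 0 == 2)
      = (PySem.Set.ofList hand.toList).countP (fun c => hand.toList.count c == 2) := by
    refine List.countP_congr (fun x _ => ?_)
    simp only [PySem.Dict.getD_counter, beq_iff_eq]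
    constructor <;> intro hh <;> exact_mod_cast hh
  rw [hc]
  simp

theorem pairwise_not_mem_dropWhile {c : Char} {rest : List Char}
    (h : (c :: rest).Pairwise (· ≤ ·)) : c ∉ rest.dropWhile (fun x => x == c) := by
  intro hc
  obtain ⟨d, r', hr⟩ := List.exists_cons_of_ne_nil (List.ne_nil_of_mem hc)
  have hne : rest.dropWhile (fun x => x == c) ≠ [] := by simp [hr]
  have hd : (d == c) = false := by
    have := List.head_dropWhile_not (fun x => x == c) hne
    simpa [hr] using this
  have hdc : d ≠ c := by simpa using hd
  have hsub := List.dropWhile_sublist (l := rest) (fun x => x == c)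
  have hpr : (rest.dropWhile (fun x => x == c)).Pairwise (· ≤ ·) :=
    List.Pairwise.sublist hsub (List.pairwise_cons.mp h).2
  have hdmem : d ∈ rest := hsub.mem (by simp [hr])
  have hlt : c < d := lt_of_le_of_ne ((List.pairwise_cons.mp h).1 d hdmem)
    (fun he => hdc he.symm)
  rw [hr] at hc hpr
  rcases List.mem_cons.mp hc with h1 | h2
  · exact hdc h1.symm
  · exact absurd ((List.pairwise_cons.mp hpr).1 c h2) (not_le.mpr hlt)

theorem tally_cons {c : Char} {rest : List Char} (h : (c :: rest).Pairwise (· ≤ ·)) :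
    pvTally (c :: rest)
      = (if (rest.takeWhile (fun x => x == c)).length = 1 then 1 else 0)
        + pvTally (rest.dropWhile (fun x => x == c)) := by
  set t := rest.takeWhile (fun x => x == c) with htdef
  set r := rest.dropWhile (fun x => x == c) with hrdef
  have htc : ∀ x ∈ t, x = c := fun x hx => by
    have := List.mem_takeWhile_imp hx; simpa using this
  have hcr : c ∉ r := pairwise_not_mem_dropWhile h
  have hsplit : t ++ r = rest := List.takeWhile_append_dropWhile
  -- the deduped list of c :: rest is a permutation of c :: (deduped r)
  have hperm : (PySem.Set.ofList (c :: rest)).Perm (c :: PySem.Set.ofList r) := by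
    refine (List.perm_ext_iff_of_nodup (PySem.Set.nodup_ofList _) ?_).mpr ?_
    · exact List.nodup_cons.mpr ⟨by simpa [PySem.Set.mem_ofList] using hcr,
        PySem.Set.nodup_ofList _⟩
    · intro a
      simp only [PySem.Set.mem_ofList, List.mem_cons, ← hsplit, List.mem_append]
      constructor
      · rintro (ha | ha | ha)
        · exact Or.inl ha
        · exact Or.inl (htc a ha)
        · exact Or.inr (by simpa [PySem.Set.mem_ofList] using ha)
      · rintro (ha | ha)
        · exact Or.inl ha
        · exact Or.inr (Or.inr (by simpa [PySem.Set.mem_ofList] using ha))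
  have hcount_t : t.count c = t.length :=
    List.count_eq_length.mpr (fun b hb => (htc b hb).symm)
  have hcount_c : (c :: rest).count c = 1 + t.length := by
    rw [← hsplit, List.count_cons, List.count_append, hcount_t,
      List.count_eq_zero.mpr hcr]
    simp [Nat.add_comm]
  have hcount_x : ∀ x, x ≠ c → (c :: rest).count x = r.count x := by
    intro x hx
    have hxt : t.count x = 0 := List.count_eq_zero.mpr
      (fun hmem => hx (htc x hmem))
    rw [← hsplit, List.count_cons, List.count_append, hxt]
    simp [beq_iff_eq, Ne.symm hx]
  unfold pvTally
  rw [hperm.countP_eq]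
  rw [List.countP_cons]
  have hpred : (PySem.Set.ofList r).countP (fun x => (c :: rest).count x == 2)
      = (PySem.Set.ofList r).countP (fun x => r.count x == 2) := by
    refine List.countP_congr (fun x hx => ?_)
    have hxr : x ∈ r := (PySem.Set.mem_ofList r x).mp hx
    have hxc : x ≠ c := fun he => hcr (he ▸ hxr)
    rw [hcount_x x hxc]
  rw [hpred]
  have hpc : ((c :: rest).count c == 2) = (t.length == 1) := by
    rw [hcount_c, Bool.eq_iff_iff]
    simp only [beq_iff_eq]
    omega
  rw [hpc]
  by_cases hl : t.length = 1
  · simp [hl]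
    omega
  · simp [hl]

theorem pvRunLoop_tally (l : List Char) (acc : Int) (h : l.Pairwise (· ≤ ·)) :
    pvRunLoop l acc = acc + pvTally l := by
  revert h
  induction l, acc using pvRunLoop.induct with
  | case1 pairs => intro _; simp [pvRunLoop, pvTally, PySem.Set.ofList]
  | case2 c rest pairs p ih =>
    intro h
    have hpr : ((pvSplitRun c rest).2).Pairwise (· ≤ ·) := by
      rw [pvSplitRun_eq]
      exact List.Pairwise.sublist (List.dropWhile_sublist _) (List.pairwise_cons.mp h).2
    have ih' := ih hpr
    rw [dite_eq_ite] at ih'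
    rw [show p = pvSplitRun c rest from rfl] at ih'
    rw [pvRunLoop, ih', tally_cons h]
    simp only [pvSplitRun_eq]
    by_cases hl : (rest.takeWhile (fun x => x == c)).length = 1
    · simp [hl]
      omega
    · have hb : (((rest.takeWhile (fun x => x == c)).length : Int) + 1 == 2) = false := by
        simp only [beq_eq_false_iff_ne, ne_eq]
        intro hh
        exact hl (by omega)
      simp [hb, hl]

theorem tally_sorted (xs : List Char) :
    pvTally (PySem.List.sorted xs (fun x => x) false) = pvTally xs := by
  have hp : (PySem.List.sorted xs (fun x => x) false).Perm xs :=
    PySem.List.sorted_perm xs (fun x => x) false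
  unfold pvTally
  have h1 : (PySem.Set.ofList (PySem.List.sorted xs (fun x => x) false)).countP
      (fun c => (PySem.List.sorted xs (fun x => x) false).count c == 2)
      = (PySem.Set.ofList (PySem.List.sorted xs (fun x => x) false)).countP
      (fun c => xs.count c == 2) :=
    List.countP_congr (fun x _ => by rw [hp.count_eq])
  have h2 : (PySem.Set.ofList (PySem.List.sorted xs (fun x => x) false)).Perm
      (PySem.Set.ofList xs) := by
    refine (List.perm_ext_iff_of_nodup (PySem.Set.nodup_ofList _)
      (PySem.Set.nodup_ofList _)).mpr (fun a => ?_)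
    simp [PySem.Set.mem_ofList, hp.mem_iff]
  rw [h1, h2.countP_eq]

-- ===== VERDICT (by name: the statement is the Claim_ definition above) =====
theorem two_pair_spec : Claim_equal_two_pair := by
  intro hand _
  unfold Spec_two_pair two_pair_alt
  rw [two_pair_tally, pvRunLoop_tally _ _ (PySem.List.sorted_pairwise hand.toList (fun x => x)),
      tally_sorted]
  simp
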